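-- pv_equiv track=rewrite | github.com/Javzaat/ai-lab2-3_games | xo_nxn_ai.py | find_winning_cells
-- ===== SOURCE A (Python) =====
-- def in_bounds(n, r, c):
--     """
--     (r, c) координат board-ийн хүрээнд багтаж байгаа эсэхийг шалгана.
--     """
--     return 0 <= r < n and 0 <= c < n
--
-- def find_winning_cells(board, player, k):
--     """
--     Тухайн player ("X" эсвэл "O") нь K дараалсан тэмдэг тавьж чадсан эсэхийг шалгана.
--     Хэрвээ олдвол яг тэр K дараалсан нүднүүдийн координатыг буцаана.
--
--     Дараах 4 чиглэлээр шалгана: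
--       (0,1)   = хэвтээ (→)
--       (1,0)   = босоо (↓)
--       (1,1)   = диагональ (↘)
--       (1,-1)  = эсрэг диагональ (↙)
--     """
--     n = len(board)
--     dirs = [(0,1), (1,0), (1,1), (1,-1)]
--
--     for r in range(n):
--         for c in range(n):
--             if board[r][c] != player:
--                 continue
--
--             for dr, dc in dirs:
--                 cells = [(r, c)]
--                 rr, cc = r + dr, c + dc
--
--                 while in_bounds(n, rr, cc) and board[rr][cc] == player:
--                     cells.append((rr, cc))
--                     if len(cells) == k:
--                         return cells
--                     rr += dr
--                     cc += dc
--
--     return None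
-- ===== SOURCE B (Python) =====
-- def find_winning_cells(board, player, k):
--     n = len(board)
--     if k < 1:
--         return None
--     dirs = [(0, 1), (1, 0), (1, 1), (1, -1)]
--     # ends[(i, r, c)] = number of consecutive player cells that END at (r, c)
--     # when moving along direction dirs[i]; one top-left-to-bottom-right pass.
--     ends = {}
--     for r in range(n):
--         for c in range(n):
--             if board[r][c] == player:
--                 for i in range(4):
--                     dr, dc = dirs[i]
--                     ends[(i, r, c)] = 1 + ends.get((i, r - dr, c - dc), 0)
--     # A k-run starting at (r, c) in direction i exists iff the run ending at
--     # the segment's last cell has length >= k; scan in the same order as the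
--     # naive search so the first hit is identical.
--     for r in range(n):
--         for c in range(n):
--             for i in range(4):
--                 dr, dc = dirs[i]
--                 if ends.get((i, r + (k - 1) * dr, c + (k - 1) * dc), 0) >= k:
--                     return [(r + t * dr, c + t * dc) for t in range(k)]
--     return None
-- ===== Notes on version B (the rewrite author's own statement) =====
-- stated objective: alternative
-- what changed: Replaces the per-cell directional re-walk with a run-length DP: one pass builds a dict of run lengths ending at each cell per direction, then a same-order scan tests the precomputed run length at the segment's last cell instead of walking the segment again.
-- intended difference: For k = 1 on a board that contains a player cell inside the n x n square, A returns None (its length check fires only after a second cell is appended, so a run of 1 is never reported) while B returns the first player cell [(r, c)], the intended answer to 'find 1 consecutive player cell'. — e.g. on find_winning_cells([["X"]], "X", 1): A returns none, B returns some [(0, 0)]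
-- outside the precondition, e.g. on find_winning_cells([['X', 'X'], ['X']], 'X', 2): A returns [(0, 0), (0, 1)], B raises IndexError
import Mathlib
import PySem

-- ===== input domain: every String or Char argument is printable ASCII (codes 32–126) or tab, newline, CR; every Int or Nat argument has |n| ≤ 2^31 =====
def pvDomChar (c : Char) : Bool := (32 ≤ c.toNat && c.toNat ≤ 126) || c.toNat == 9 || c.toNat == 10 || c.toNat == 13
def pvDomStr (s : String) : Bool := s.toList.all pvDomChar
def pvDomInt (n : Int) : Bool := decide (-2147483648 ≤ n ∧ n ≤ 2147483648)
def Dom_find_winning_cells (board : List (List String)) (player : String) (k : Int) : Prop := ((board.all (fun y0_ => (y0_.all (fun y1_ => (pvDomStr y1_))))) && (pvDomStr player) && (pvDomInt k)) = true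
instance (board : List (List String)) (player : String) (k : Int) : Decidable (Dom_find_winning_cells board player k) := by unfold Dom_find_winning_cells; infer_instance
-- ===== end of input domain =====

-- B replaces A's per-cell directional re-walk by a different algorithm: one pass builds a
-- dict of run lengths ending at each cell per direction, then the same-order scan tests the
-- precomputed run length at the segment's last cell instead of walking the segment again;
-- for k = 1 A never reports a run (see D_ below) while B returns the cell.

-- board[r][c] (both ports index the same way; indices reaching this are ≥ 0)
def pvCell (board : List (List String)) (r c : Int) : Option String :=
  (PySem.List.pyGet? board r).bind fun row => PySem.List.pyGet? row c

-- ===== PORT A =====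
def pv_in_bounds (n r c : Int) : Bool :=
  decide (0 ≤ r) && decide (r < n) && decide (0 ≤ c) && decide (c < n)

-- the while-loop of A: append, test len == k, step; fuel n+1 bounds its iterations
def pvWalkA (board : List (List String)) (player : String) (k n dr dc : Int) :
    List (Int × Int) → Int → Int → Nat → Option (List (Int × Int))
  | _, _, _, 0 => none
  | cells, rr, cc, fuel+1 =>
    if pv_in_bounds n rr cc && (pvCell board rr cc == some player) then
      let cells' := cells ++ [(rr, cc)]
      if (cells'.length : Int) = k then some cells'
      else pvWalkA board player k n dr dc cells' (rr + dr) (cc + dc) fuel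
    else none

def pvTryDirsA (board : List (List String)) (player : String) (k n r c : Int) :
    List (Int × Int) → Option (List (Int × Int))
  | [] => none
  | (dr, dc) :: rest =>
    match pvWalkA board player k n dr dc [(r, c)] (r + dr) (c + dc) (n.toNat + 1) with
    | some cells => some cells
    | none => pvTryDirsA board player k n r c rest

def pvScanColsA (board : List (List String)) (player : String) (k n r : Int) :
    List Int → Option (List (Int × Int))
  | [] => none
  | c :: cs =>
    if pvCell board r c == some player then
      match pvTryDirsA board player k n r c [(0,1),(1,0),(1,1),(1,-1)] with
      | some w => some w
      | none => pvScanColsA board player k n r cs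
    else pvScanColsA board player k n r cs

def pvScanRowsA (board : List (List String)) (player : String) (k n : Int) :
    List Int → Option (List (Int × Int))
  | [] => none
  | r :: rs =>
    match pvScanColsA board player k n r (PySem.List.pyRange 0 n 1) with
    | some w => some w
    | none => pvScanRowsA board player k n rs

def find_winning_cells (board : List (List String)) (player : String) (k : Int) :
    Option (List (Int × Int)) :=
  let n : Int := board.length
  pvScanRowsA board player k n (PySem.List.pyRange 0 n 1)

-- ===== PORT B =====
def pvDirs : List (Int × Int) := [(0,1),(1,0),(1,1),(1,-1)]

-- body of B's build loop for one player cell: for i in range(4): ends[(i,r,c)] = 1 + ends.get((i,r-dr,c-dc),0)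
def pvBuildCell (d : PySem.Dict (Int × Int × Int) Int) (r c : Int) :
    PySem.Dict (Int × Int × Int) Int :=
  (PySem.List.pyRange 0 4 1).foldl (fun d i =>
    let dir := PySem.List.pyGetD pvDirs i (0, 0)
    d.insert (i, r, c) (1 + d.getD (i, r - dir.1, c - dir.2) 0)) d

def pvEnds (board : List (List String)) (player : String) (n : Int) :
    PySem.Dict (Int × Int × Int) Int :=
  (PySem.List.pyRange 0 n 1).foldl (fun d r =>
    (PySem.List.pyRange 0 n 1).foldl (fun d c =>
      if pvCell board r c == some player then pvBuildCell d r c else d) d)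
    PySem.Dict.empty

def pvScanDirsB (ends : PySem.Dict (Int × Int × Int) Int) (k r c : Int) :
    List Int → Option (List (Int × Int))
  | [] => none
  | i :: is =>
    let dir := PySem.List.pyGetD pvDirs i (0, 0)
    if k ≤ ends.getD (i, r + (k - 1) * dir.1, c + (k - 1) * dir.2) 0 then
      some ((PySem.List.pyRange 0 k 1).map fun t => (r + t * dir.1, c + t * dir.2))
    else pvScanDirsB ends k r c is

def pvScanColsB (ends : PySem.Dict (Int × Int × Int) Int) (k r : Int) :
    List Int → Option (List (Int × Int))
  | [] => none
  | c :: cs =>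
    match pvScanDirsB ends k r c (PySem.List.pyRange 0 4 1) with
    | some w => some w
    | none => pvScanColsB ends k r cs

def pvScanRowsB (ends : PySem.Dict (Int × Int × Int) Int) (k n : Int) :
    List Int → Option (List (Int × Int))
  | [] => none
  | r :: rs =>
    match pvScanColsB ends k r (PySem.List.pyRange 0 n 1) with
    | some w => some w
    | none => pvScanRowsB ends k n rs

def find_winning_cells_alt (board : List (List String)) (player : String) (k : Int) :
    Option (List (Int × Int)) :=
  let n : Int := board.length
  if k < 1 then none
  else
    let ends := pvEnds board player n
    pvScanRowsB ends k n (PySem.List.pyRange 0 n 1)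

-- ===== PRECONDITION & SPEC =====
-- Pre_ excludes boards with a row shorter than the board itself: there A raises
-- IndexError as soon as its scan reaches the short row (and may return only if it wins
-- before reaching it, where B's full DP pass raises instead).
def Pre_find_winning_cells (board : List (List String)) (player : String) (k : Int) : Prop :=
  ∀ row ∈ board, board.length ≤ row.length
instance (board : List (List String)) (player : String) (k : Int) :
    Decidable (Pre_find_winning_cells board player k) := by
  unfold Pre_find_winning_cells; infer_instance

def pvWitness_find_winning_cells : List (List String) × String × Int :=
  ([["X", "O"], ["O", "X"]], "X", 2)

-- For k = 1 on a board with a player cell inside the n×n square, A returns none (its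
-- length test fires only after a second cell is appended, so a run of 1 is never
-- reported) while B returns the first player cell, the intended answer for k = 1.
def D_find_winning_cells (board : List (List String)) (player : String) (k : Int) : Prop :=
  k = 1 ∧ ((List.range board.length).any fun r => (List.range board.length).any fun c =>
    (board.getD r []).getD c "" == player) = true
instance (board : List (List String)) (player : String) (k : Int) :
    Decidable (D_find_winning_cells board player k) := by
  unfold D_find_winning_cells; infer_instance

def Spec_find_winning_cells (board : List (List String)) (player : String) (k : Int)
    (out : Option (List (Int × Int))) : Prop :=
  ¬ D_find_winning_cells board player k → out = find_winning_cells_alt board player k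
instance (board : List (List String)) (player : String) (k : Int)
    (out : Option (List (Int × Int))) : Decidable (Spec_find_winning_cells board player k out) := by
  unfold Spec_find_winning_cells; infer_instance

def pvDiffWitness_find_winning_cells : List (List String) × String × Int :=
  ([["X"]], "X", 1)
def pvDiffWitnessOut_find_winning_cells :
    (Option (List (Int × Int))) × (Option (List (Int × Int))) :=
  (none, some [(0, 0)])

-- ===== CLAIM =====
def Claim_unchanged_find_winning_cells : Prop :=
  ∀ (board : List (List String)) (player : String) (k : Int),
    Dom_find_winning_cells board player k → Pre_find_winning_cells board player k →
    Spec_find_winning_cells board player k (find_winning_cells board player k)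
def Claim_changed_find_winning_cells : Prop :=
  Dom_find_winning_cells (pvDiffWitness_find_winning_cells.1) (pvDiffWitness_find_winning_cells.2.1) (pvDiffWitness_find_winning_cells.2.2) ∧
  Pre_find_winning_cells (pvDiffWitness_find_winning_cells.1) (pvDiffWitness_find_winning_cells.2.1) (pvDiffWitness_find_winning_cells.2.2) ∧
  D_find_winning_cells (pvDiffWitness_find_winning_cells.1) (pvDiffWitness_find_winning_cells.2.1) (pvDiffWitness_find_winning_cells.2.2) ∧
  find_winning_cells (pvDiffWitness_find_winning_cells.1) (pvDiffWitness_find_winning_cells.2.1) (pvDiffWitness_find_winning_cells.2.2) = pvDiffWitnessOut_find_winning_cells.1 ∧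
  find_winning_cells_alt (pvDiffWitness_find_winning_cells.1) (pvDiffWitness_find_winning_cells.2.1) (pvDiffWitness_find_winning_cells.2.2) = pvDiffWitnessOut_find_winning_cells.2 ∧
  pvDiffWitnessOut_find_winning_cells.1 ≠ pvDiffWitnessOut_find_winning_cells.2
def Claim_exact_find_winning_cells : Prop :=
  ∀ (board : List (List String)) (player : String) (k : Int),
    Dom_find_winning_cells board player k → Pre_find_winning_cells board player k →
    D_find_winning_cells board player k →
    find_winning_cells board player k ≠ find_winning_cells_alt board player k

-- ===== LEMMAS AND PROOFS =====

-- the shared step guard: in bounds of the n×n square and holding the player's mark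
def pvOk (board : List (List String)) (player : String) (n x y : Int) : Bool :=
  pv_in_bounds n x y && (pvCell board x y == some player)

-- run length ending at (x, y) along (dr, dc), fuel-indexed
def pvE (board : List (List String)) (player : String) (n dr dc : Int) :
    Nat → Int → Int → Int
  | 0, _, _ => 0
  | f+1, x, y =>
    if pvOk board player n x y then 1 + pvE board player n dr dc f (x - dr) (y - dc) else 0

def pvMu (n x y : Int) : Nat := (x * (n + 1) + y + 1).toNat

-- canonical (fuel-free) run length
def pvEc (board : List (List String)) (player : String) (n dr dc x y : Int) : Int :=
  pvE board player n dr dc (pvMu n x y) x y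

theorem pvE_nonneg (board player n dr dc) :
    ∀ f x y, 0 ≤ pvE board player n dr dc f x y := by
  intro f
  induction f with
  | zero => intro x y; simp [pvE]
  | succ f ih =>
    intro x y
    simp only [pvE]
    split
    · have := ih (x - dr) (y - dc); omega
    · exact le_refl 0

theorem pvOk_bounds {board player n x y} (h : pvOk board player n x y = true) :
    0 ≤ x ∧ x < n ∧ 0 ≤ y ∧ y < n := by
  simp only [pvOk, pv_in_bounds, Bool.and_eq_true, decide_eq_true_eq] at h
  exact ⟨h.1.1.1.1, h.1.1.1.2, h.1.1.2, h.1.2⟩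

theorem pvMu_lt {board player n dr dc x y} (hd : (dr, dc) ∈ pvDirs)
    (h : pvOk board player n x y = true) :
    pvMu n (x - dr) (y - dc) < pvMu n x y := by
  obtain ⟨hx0, hxn, hy0, hyn⟩ := pvOk_bounds h
  simp only [pvDirs, List.mem_cons, List.not_mem_nil, or_false, Prod.mk.injEq] at hd
  unfold pvMu
  have hxy : 1 ≤ x * (n + 1) + y + 1 := by nlinarith
  rcases hd with ⟨e1, e2⟩ | ⟨e1, e2⟩ | ⟨e1, e2⟩ | ⟨e1, e2⟩ <;> subst e1 <;> subst e2 <;>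
    [ (have key : (x - 0) * (n + 1) + (y - 1) + 1 < x * (n + 1) + y + 1 := by nlinarith);
      (have key : (x - 1) * (n + 1) + (y - 0) + 1 < x * (n + 1) + y + 1 := by nlinarith);
      (have key : (x - 1) * (n + 1) + (y - 1) + 1 < x * (n + 1) + y + 1 := by nlinarith);
      (have key : (x - 1) * (n + 1) + (y - -1) + 1 < x * (n + 1) + y + 1 := by nlinarith)] <;>
    omega

theorem pvE_stable {board player n dr dc} (hd : (dr, dc) ∈ pvDirs) :
    ∀ f g x y, pvMu n x y ≤ f → pvMu n x y ≤ g →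
      pvE board player n dr dc f x y = pvE board player n dr dc g x y := by
  intro f
  induction f using Nat.strong_induction_on with
  | _ f ih =>
    intro g x y hf hg
    match f, g with
    | 0, g =>
      have hμ : pvMu n x y = 0 := by omega
      have hok : pvOk board player n x y = false := by
        by_contra hc
        have h' : pvOk board player n x y = true := by
          cases hb : pvOk board player n x y
          · exact absurd hb hc
          · rfl
        obtain ⟨hx0, hxn, hy0, hyn⟩ := pvOk_bounds h'
        have : 1 ≤ x * (n + 1) + y + 1 := by nlinarith
        unfold pvMu at hμ; omega
      cases g with
      | zero => rfl
      | succ g => simp [pvE, hok]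
    | Nat.succ f, 0 =>
      have hμ : pvMu n x y = 0 := by omega
      have hok : pvOk board player n x y = false := by
        by_contra hc
        have h' : pvOk board player n x y = true := by
          cases hb : pvOk board player n x y
          · exact absurd hb hc
          · rfl
        obtain ⟨hx0, hxn, hy0, hyn⟩ := pvOk_bounds h'
        have : 1 ≤ x * (n + 1) + y + 1 := by nlinarith
        unfold pvMu at hμ; omega
      simp [pvE, hok]
    | Nat.succ f, Nat.succ g =>
      simp only [pvE]
      cases hok : pvOk board player n x y with
      | false => rfl
      | true =>
        simp only [if_pos]
        have hlt := pvMu_lt hd hok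
        have e1 := ih f (by omega) g (x - dr) (y - dc) (by omega) (by omega)
        rw [e1]

theorem pvEc_unfold {board player n dr dc x y} (hd : (dr, dc) ∈ pvDirs) :
    pvEc board player n dr dc x y =
      if pvOk board player n x y then 1 + pvEc board player n dr dc (x - dr) (y - dc) else 0 := by
  cases hok : pvOk board player n x y with
  | false =>
    rw [pvEc]
    cases hμ : pvMu n x y with
    | zero => simp [pvE, hok]
    | succ m => simp [pvE, hok]
  | true =>
    have hlt := pvMu_lt hd hok
    have hμ : 1 ≤ pvMu n x y := by omega
    obtain ⟨m, hm⟩ : ∃ m, pvMu n x y = m + 1 := ⟨pvMu n x y - 1, by omega⟩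
    rw [pvEc, hm]
    simp only [pvE, hok, if_true]
    rw [pvEc]
    congr 1
    exact pvE_stable hd m (pvMu n (x - dr) (y - dc)) (x - dr) (y - dc) (by omega) (le_refl _)

theorem pvEc_ge_iff {board player n dr dc} (hd : (dr, dc) ∈ pvDirs) (j : Nat) (x y : Int) :
    ((j : Int) ≤ pvEc board player n dr dc x y ↔
      ∀ t : Nat, t < j → pvOk board player n (x - t * dr) (y - t * dc) = true) := by
  induction j generalizing x y with
  | zero =>
    simp only [Nat.cast_zero]
    constructor
    · intro _ t ht; omega
    · intro _; exact pvE_nonneg board player n dr dc _ x y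
  | succ j ih =>
    rw [pvEc_unfold hd]
    cases hok : pvOk board player n x y with
    | false =>
      simp only [hok, Bool.false_eq_true, if_false]
      constructor
      · intro h; push_cast at h; omega
      · intro hall
        have h0 := hall 0 (by omega)
        simp only [Nat.cast_zero, zero_mul, sub_zero] at h0
        rw [h0] at hok; cases hok
    | true =>
      simp only [hok, if_true]
      have hrec := ih (x - dr) (y - dc)
      constructor
      · intro h t ht
        cases t with
        | zero => simpa using hok
        | succ t =>
          have h' : (j : Int) ≤ pvEc board player n dr dc (x - dr) (y - dc) := by
            push_cast at h ⊢; omega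
          have := hrec.mp h' t (by omega)
          have e1 : x - dr - t * dr = x - (t + 1 : Nat) * dr := by push_cast; ring
          have e2 : y - dc - t * dc = y - (t + 1 : Nat) * dc := by push_cast; ring
          rw [e1, e2] at this
          exact this
      · intro hall
        have h' : ∀ t : Nat, t < j → pvOk board player n (x - dr - t * dr) (y - dc - t * dc) = true := by
          intro t ht
          have := hall (t + 1) (by omega)
          have e1 : x - dr - t * dr = x - (t + 1 : Nat) * dr := by push_cast; ring
          have e2 : y - dc - t * dc = y - (t + 1 : Nat) * dc := by push_cast; ring
          rw [e1, e2]
          exact this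
        have := hrec.mpr h'
        push_cast
        omega

-- A's while-loop, characterized: with enough fuel it returns the k-cell segment iff the
-- remaining m cells ahead are all in-bounds player cells
theorem pvWalkA_eq {board : List (List String)} {player : String} {k n dr dc : Int}
    (hd : (dr, dc) ∈ pvDirs) :
    ∀ (f m : Nat) (acc : List (Int × Int)) (rr cc : Int),
      1 ≤ m → (acc.length : Int) + m = k →
      (n - (if dr = 0 then cc else rr)).toNat + 1 ≤ f →
      pvWalkA board player k n dr dc acc rr cc f =
        (if ∀ t : Nat, t < m → pvOk board player n (rr + t * dr) (cc + t * dc) = true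
         then some (acc ++ (List.range m).map (fun t : Nat => (rr + (t : Int) * dr, cc + (t : Int) * dc)))
         else none) := by
  intro f
  induction f with
  | zero => intro m acc rr cc _ _ hf; omega
  | succ f ih =>
    intro m acc rr cc hm hlen hf
    simp only [pvWalkA]
    have hcond : (pv_in_bounds n rr cc && (pvCell board rr cc == some player))
        = pvOk board player n rr cc := rfl
    rw [hcond]
    cases hok : pvOk board player n rr cc with
    | false =>
      have hnot : ¬ ∀ t : Nat, t < m → pvOk board player n (rr + t * dr) (cc + t * dc) = true := by
        intro hall
        have h0 := hall 0 (by omega)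
        simp only [Nat.cast_zero, zero_mul, add_zero] at h0
        rw [h0] at hok; cases hok
      rw [if_neg hnot]
      simp [hok]
    | true =>
      simp only [if_true]
      by_cases hm1 : m = 1
      · subst hm1
        rw [if_pos (by
          simp only [List.length_append, List.length_cons, List.length_nil]
          push_cast; omega : ((acc ++ [(rr, cc)]).length : Int) = k)]
        · rw [if_pos]
          · simp
          · intro t ht
            have ht0 : t = 0 := by omega
            subst ht0
            simpa using hok
      · -- m ≥ 2: recurse
        rw [if_neg (by
          simp only [List.length_append, List.length_cons, List.length_nil]
          push_cast; omega : ¬ ((acc ++ [(rr, cc)]).length : Int) = k)]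
        obtain ⟨m', hm'⟩ : ∃ m', m = m' + 1 := ⟨m - 1, by omega⟩
        subst hm'
        have hm'1 : 1 ≤ m' := by omega
        obtain ⟨hrr0, hrrn, hcc0, hccn⟩ := pvOk_bounds hok
        have hfuel : (n - (if dr = 0 then cc + dc else rr + dr)).toNat + 1 ≤ f := by
          simp only [pvDirs, List.mem_cons, List.not_mem_nil, or_false, Prod.mk.injEq] at hd
          rcases hd with ⟨e1, e2⟩ | ⟨e1, e2⟩ | ⟨e1, e2⟩ | ⟨e1, e2⟩ <;> subst e1 <;> subst e2 <;>
            simp_all <;> omega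
        have := ih m' (acc ++ [(rr, cc)]) (rr + dr) (cc + dc) hm'1 (by simp; push_cast; omega) hfuel
        rw [this]
        have hshift : (∀ t : Nat, t < m' → pvOk board player n (rr + dr + t * dr) (cc + dc + t * dc) = true)
            ↔ (∀ t : Nat, t < m' + 1 → pvOk board player n (rr + t * dr) (cc + t * dc) = true) := by
          constructor
          · intro h t ht
            cases t with
            | zero => simpa using hok
            | succ t =>
              have := h t (by omega)
              have e1 : rr + dr + t * dr = rr + ((t + 1 : Nat) : Int) * dr := by push_cast; ring
              have e2 : cc + dc + t * dc = cc + ((t + 1 : Nat) : Int) * dc := by push_cast; ring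
              rw [e1, e2] at this
              exact this
          · intro h t ht
            have := h (t + 1) (by omega)
            have e1 : rr + ((t + 1 : Nat) : Int) * dr = rr + dr + t * dr := by push_cast; ring
            have e2 : cc + ((t + 1 : Nat) : Int) * dc = cc + dc + t * dc := by push_cast; ring
            rw [e1, e2] at this
            exact this
        by_cases hC : ∀ t : Nat, t < m' + 1 → pvOk board player n (rr + t * dr) (cc + t * dc) = true
        · rw [if_pos (hshift.mpr hC), if_pos hC]
          congr 1
          rw [List.append_assoc]
          congr 1
          rw [List.range_succ_eq_map, List.map_cons, List.map_map]
          simp only [Nat.cast_zero, zero_mul, add_zero, List.singleton_append]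
          congr 1
          refine List.map_congr_left (fun t _ => ?_)
          simp only [Function.comp_apply, Prod.mk.injEq]
          constructor <;> (push_cast; ring)
        · rw [if_neg (fun h => hC (hshift.mp h)), if_neg hC]

-- direction i of pvDirs, as B's code reads it
def pvDirI (i : Int) : Int × Int := PySem.List.pyGetD pvDirs i (0, 0)

-- the value B's dict is meant to hold at key (i, x, y)
def pvV (board : List (List String)) (player : String) (n i x y : Int) : Int :=
  pvEc board player n (pvDirI i).1 (pvDirI i).2 x y

-- invariant of B's build loop: cells strictly before (r, c) in row-major order are final
def pvInv (board : List (List String)) (player : String) (n : Int)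
    (d : PySem.Dict (Int × Int × Int) Int) (r c : Int) : Prop :=
  ∀ i x y : Int, d.getD (i, x, y) 0 =
    if 0 ≤ i ∧ i < 4 ∧ 0 ≤ x ∧ x < n ∧ 0 ≤ y ∧ y < n ∧ (x < r ∨ (x = r ∧ y < c))
    then pvV board player n i x y else 0

theorem pvDirI_mem {i : Int} (h0 : 0 ≤ i) (h4 : i < 4) : pvDirI i ∈ pvDirs := by
  interval_cases i <;> decide

theorem pvV_out {board player n i x y} (h : ¬ (0 ≤ x ∧ x < n ∧ 0 ≤ y ∧ y < n))
    (h0 : 0 ≤ i) (h4 : i < 4) : pvV board player n i x y = 0 := by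
  have hmem := pvDirI_mem h0 h4
  obtain ⟨dr, dc, he⟩ : ∃ dr dc, pvDirI i = (dr, dc) := ⟨(pvDirI i).1, (pvDirI i).2, rfl⟩
  rw [he] at hmem
  rw [pvV, he]
  rw [pvEc_unfold hmem, if_neg]
  intro hok
  exact h (pvOk_bounds hok)

theorem pvV_not_player {board player n i x y} (h : (pvCell board x y == some player) = false)
    (h0 : 0 ≤ i) (h4 : i < 4) : pvV board player n i x y = 0 := by
  have hmem := pvDirI_mem h0 h4
  obtain ⟨dr, dc, he⟩ : ∃ dr dc, pvDirI i = (dr, dc) := ⟨(pvDirI i).1, (pvDirI i).2, rfl⟩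
  rw [he] at hmem
  rw [pvV, he]
  rw [pvEc_unfold hmem, if_neg]
  intro hok
  rw [pvOk, h, Bool.and_false] at hok
  cases hok

theorem pvV_unfold_player {board player n i x y}
    (hb : 0 ≤ x ∧ x < n ∧ 0 ≤ y ∧ y < n)
    (hp : (pvCell board x y == some player) = true) (h0 : 0 ≤ i) (h4 : i < 4) :
    pvV board player n i x y
      = 1 + pvV board player n i (x - (pvDirI i).1) (y - (pvDirI i).2) := by
  have hmem := pvDirI_mem h0 h4
  obtain ⟨dr, dc, he⟩ : ∃ dr dc, pvDirI i = (dr, dc) := ⟨(pvDirI i).1, (pvDirI i).2, rfl⟩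
  rw [he] at hmem
  have hok : pvOk board player n x y = true := by
    rw [pvOk, pv_in_bounds, hp]
    simp only [Bool.and_true, Bool.and_eq_true, decide_eq_true_eq]
    exact ⟨⟨⟨hb.1, hb.2.1⟩, hb.2.2.1⟩, hb.2.2.2⟩
  rw [pvV, pvV, he]
  rw [pvEc_unfold hmem, if_pos hok]

theorem pvInv_step {board player n d r c}
    (hr : 0 ≤ r) (hrn : r < n) (hc : 0 ≤ c) (hcn : c < n)
    (hInv : pvInv board player n d r c) :
    pvInv board player n
      (if pvCell board r c == some player then pvBuildCell d r c else d) r (c + 1) := by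
  unfold pvInv at hInv
  cases hp : (pvCell board r c == some player) with
  | false =>
    simp only [hp, Bool.false_eq_true, if_false]
    intro i x y
    rw [hInv i x y]
    split_ifs with h1 h2
    · rfl
    · exfalso; omega
    · -- new region point must be (r, c) with i in range; value is 0 there
      have hx : x = r := by omega
      have hy : y = c := by omega
      subst hx; subst hy
      exact (pvV_not_player hp (by omega) (by omega)).symm
    · rfl
  | true =>
    simp only [hp, if_true]
    intro i x y
    rw [pvBuildCell, show PySem.List.pyRange 0 4 1 = [0, 1, 2, 3] from by decide]
    simp only [List.foldl_cons, List.foldl_nil,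
      show PySem.List.pyGetD pvDirs 0 (0, 0) = ((0 : Int), (1 : Int)) from by decide,
      show PySem.List.pyGetD pvDirs 1 (0, 0) = ((1 : Int), (0 : Int)) from by decide,
      show PySem.List.pyGetD pvDirs 2 (0, 0) = ((1 : Int), (1 : Int)) from by decide,
      show PySem.List.pyGetD pvDirs 3 (0, 0) = ((1 : Int), (-1 : Int)) from by decide]
    simp only [PySem.Dict.getD_insert, Prod.mk.injEq, Int.reduceEq, false_and, if_false, hInv]
    have hv0 := pvV_unfold_player (board := board) (player := player) (n := n) (i := 0)
      ⟨hr, hrn, hc, hcn⟩ hp (by omega) (by omega)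
    have hv1 := pvV_unfold_player (board := board) (player := player) (n := n) (i := 1)
      ⟨hr, hrn, hc, hcn⟩ hp (by omega) (by omega)
    have hv2 := pvV_unfold_player (board := board) (player := player) (n := n) (i := 2)
      ⟨hr, hrn, hc, hcn⟩ hp (by omega) (by omega)
    have hv3 := pvV_unfold_player (board := board) (player := player) (n := n) (i := 3)
      ⟨hr, hrn, hc, hcn⟩ hp (by omega) (by omega)
    rw [show pvDirI 0 = ((0 : Int), (1 : Int)) from by decide] at hv0
    rw [show pvDirI 1 = ((1 : Int), (0 : Int)) from by decide] at hv1
    rw [show pvDirI 2 = ((1 : Int), (1 : Int)) from by decide] at hv2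
    rw [show pvDirI 3 = ((1 : Int), (-1 : Int)) from by decide] at hv3
    simp only at hv0 hv1 hv2 hv3
    by_cases hxy : x = r ∧ y = c
    · obtain ⟨hx, hy⟩ := hxy
      subst hx; subst hy
      by_cases hi3 : i = 3
      · subst hi3
        rw [if_pos ⟨rfl, rfl, rfl⟩]
        by_cases hb : 0 ≤ x - 1 ∧ x - 1 < n ∧ 0 ≤ y - (-1) ∧ y - (-1) < n
        · rw [if_pos (by omega), if_pos (by omega), hv3]
        · rw [if_neg (by omega), if_pos (by omega), hv3, pvV_out hb (by omega) (by omega)]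
      · rw [if_neg (by tauto)]
        by_cases hi2 : i = 2
        · subst hi2
          rw [if_pos ⟨rfl, rfl, rfl⟩]
          by_cases hb : 0 ≤ x - 1 ∧ x - 1 < n ∧ 0 ≤ y - 1 ∧ y - 1 < n
          · rw [if_pos (by omega), if_pos (by omega), hv2]
          · rw [if_neg (by omega), if_pos (by omega), hv2, pvV_out hb (by omega) (by omega)]
        · rw [if_neg (by tauto)]
          by_cases hi1 : i = 1
          · subst hi1
            rw [if_pos ⟨rfl, rfl, rfl⟩]
            by_cases hb : 0 ≤ x - 1 ∧ x - 1 < n ∧ 0 ≤ y - 0 ∧ y - 0 < n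
            · rw [if_pos (by omega), if_pos (by omega), hv1]
            · rw [if_neg (by omega), if_pos (by omega), hv1, pvV_out hb (by omega) (by omega)]
          · rw [if_neg (by tauto)]
            by_cases hi0 : i = 0
            · subst hi0
              rw [if_pos ⟨rfl, rfl, rfl⟩]
              by_cases hb : 0 ≤ x - 0 ∧ x - 0 < n ∧ 0 ≤ y - 1 ∧ y - 1 < n
              · rw [if_pos (by omega), if_pos (by omega), hv0]
              · rw [if_neg (by omega), if_pos (by omega), hv0, pvV_out hb (by omega) (by omega)]
            · rw [if_neg (by tauto), if_neg (by omega), if_neg (by omega)]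
    · rw [if_neg (by tauto), if_neg (by tauto), if_neg (by tauto), if_neg (by tauto)]
      split_ifs with h1 h2
      · rfl
      · exfalso; omega
      · exfalso; omega
      · rfl

theorem pvInv_iff {board player n d r1 c1 r2 c2}
    (h : ∀ x y : Int, 0 ≤ x → x < n → 0 ≤ y → y < n →
      ((x < r1 ∨ (x = r1 ∧ y < c1)) ↔ (x < r2 ∨ (x = r2 ∧ y < c2))))
    (hI : pvInv board player n d r1 c1) : pvInv board player n d r2 c2 := by
  intro i x y
  rw [hI i x y]
  split_ifs with h1 h2 h3
  · rfl
  · exact absurd ⟨h1.1, h1.2.1, h1.2.2.1, h1.2.2.2.1, h1.2.2.2.2.1, h1.2.2.2.2.2.1,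
      (h x y h1.2.2.1 h1.2.2.2.1 h1.2.2.2.2.1 h1.2.2.2.2.2.1).mp h1.2.2.2.2.2.2⟩ h2
  · exact absurd ⟨h3.1, h3.2.1, h3.2.2.1, h3.2.2.2.1, h3.2.2.2.2.1, h3.2.2.2.2.2.1,
      (h x y h3.2.2.1 h3.2.2.2.1 h3.2.2.2.2.1 h3.2.2.2.2.2.1).mpr h3.2.2.2.2.2.2⟩ h1
  · rfl

theorem pvInv_colLoop {board : List (List String)} {player : String} {n r : Int} :
    ∀ (j : Nat) (c0 : Int) (d : PySem.Dict (Int × Int × Int) Int),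
      0 ≤ c0 → (n - c0).toNat ≤ j → 0 ≤ r → r < n →
      pvInv board player n d r c0 →
      pvInv board player n
        ((PySem.List.pyRange c0 n 1).foldl
          (fun d c => if pvCell board r c == some player then pvBuildCell d r c else d) d) r n := by
  intro j
  induction j with
  | zero =>
    intro c0 d hc0 hj _ _ hI
    have he : PySem.List.pyRange c0 n 1 = [] := by
      rw [List.eq_nil_iff_forall_not_mem]
      intro z hz
      rw [PySem.List.mem_pyRange_one] at hz
      omega
    rw [he, List.foldl_nil]
    exact pvInv_iff (by intro x y _ _ _ _; omega) hI
  | succ j ih =>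
    intro c0 d hc0 hj hr hrn hI
    by_cases hlt : c0 < n
    · rw [PySem.List.pyRange_one_cons hlt, List.foldl_cons]
      exact ih (c0 + 1) _ (by omega) (by omega) hr hrn (pvInv_step hr hrn hc0 hlt hI)
    · have he : PySem.List.pyRange c0 n 1 = [] := by
        rw [List.eq_nil_iff_forall_not_mem]
        intro z hz
        rw [PySem.List.mem_pyRange_one] at hz
        omega
      rw [he, List.foldl_nil]
      exact pvInv_iff (by intro x y _ _ _ _; omega) hI

theorem pvInv_rowLoop {board : List (List String)} {player : String} {n : Int} :
    ∀ (j : Nat) (r0 : Int) (d : PySem.Dict (Int × Int × Int) Int),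
      0 ≤ r0 → (n - r0).toNat ≤ j →
      pvInv board player n d r0 0 →
      pvInv board player n
        ((PySem.List.pyRange r0 n 1).foldl
          (fun d r => (PySem.List.pyRange 0 n 1).foldl
            (fun d c => if pvCell board r c == some player then pvBuildCell d r c else d) d) d) n 0 := by
  intro j
  induction j with
  | zero =>
    intro r0 d hr0 hj hI
    have he : PySem.List.pyRange r0 n 1 = [] := by
      rw [List.eq_nil_iff_forall_not_mem]
      intro z hz
      rw [PySem.List.mem_pyRange_one] at hz
      omega
    rw [he, List.foldl_nil]
    exact pvInv_iff (by intro x y _ _ _ _; omega) hI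
  | succ j ih =>
    intro r0 d hr0 hj hI
    by_cases hlt : r0 < n
    · rw [PySem.List.pyRange_one_cons hlt, List.foldl_cons]
      apply ih (r0 + 1) _ (by omega) (by omega)
      have hcol := pvInv_colLoop n.toNat 0 d (le_refl 0) (by omega) hr0 hlt hI
      exact pvInv_iff (by intro x y _ _ _ _; omega) hcol
    · have he : PySem.List.pyRange r0 n 1 = [] := by
        rw [List.eq_nil_iff_forall_not_mem]
        intro z hz
        rw [PySem.List.mem_pyRange_one] at hz
        omega
      rw [he, List.foldl_nil]
      exact pvInv_iff (by intro x y _ _ _ _; omega) hI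

theorem pvInv_empty {board player n} : pvInv board player n PySem.Dict.empty 0 0 := by
  intro i x y
  rw [PySem.Dict.getD_empty, if_neg (by omega)]

-- what B's finished dict holds at every key it is ever asked for
theorem pvEnds_getD {board player n} (i x y : Int) (h0 : 0 ≤ i) (h4 : i < 4) :
    (pvEnds board player n).getD (i, x, y) 0 = pvV board player n i x y := by
  have h := pvInv_rowLoop (board := board) (player := player) (n := n)
    n.toNat 0 PySem.Dict.empty (le_refl 0) (by omega) pvInv_empty
  rw [pvEnds]
  rw [h i x y]
  split_ifs with hF
  · rfl
  · exact (pvV_out (by omega) h0 h4).symm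

-- a backward chain ending at the segment's last cell is the forward chain from (r, c)
theorem pvChain_rev {board player n dr dc : _} (K : Nat) (r c : Int) :
    (∀ t : Nat, t < K → pvOk board player n (r + ((K : Int) - 1) * dr - t * dr)
        (c + ((K : Int) - 1) * dc - t * dc) = true)
      ↔ (∀ t : Nat, t < K → pvOk board player n (r + t * dr) (c + t * dc) = true) := by
  constructor
  · intro h t ht
    have h' := h (K - 1 - t) (by omega)
    have e1 : r + ((K : Int) - 1) * dr - ((K - 1 - t : Nat) : Int) * dr = r + (t : Int) * dr := by
      have h1 : ((K - 1 - t : Nat) : Int) = (K : Int) - 1 - (t : Int) := by omega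
      rw [h1]; ring
    have e2 : c + ((K : Int) - 1) * dc - ((K - 1 - t : Nat) : Int) * dc = c + (t : Int) * dc := by
      have h1 : ((K - 1 - t : Nat) : Int) = (K : Int) - 1 - (t : Int) := by omega
      rw [h1]; ring
    rw [e1, e2] at h'
    exact h'
  · intro h t ht
    have h' := h (K - 1 - t) (by omega)
    have e1 : r + ((K - 1 - t : Nat) : Int) * dr = r + ((K : Int) - 1) * dr - (t : Int) * dr := by
      have h1 : ((K - 1 - t : Nat) : Int) = (K : Int) - 1 - (t : Int) := by omega
      rw [h1]; ring
    have e2 : c + ((K - 1 - t : Nat) : Int) * dc = c + ((K : Int) - 1) * dc - (t : Int) * dc := by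
      have h1 : ((K - 1 - t : Nat) : Int) = (K : Int) - 1 - (t : Int) := by omega
      rw [h1]; ring
    rw [e1, e2] at h'
    exact h'

-- B's per-direction test, characterized
theorem pvHitB_iff {board player n : _} {k : Int} (i r c : Int)
    (h0 : 0 ≤ i) (h4 : i < 4) (hk : 1 ≤ k) :
    (k ≤ (pvEnds board player n).getD
        (i, r + (k - 1) * (pvDirI i).1, c + (k - 1) * (pvDirI i).2) 0)
      ↔ (∀ t : Nat, t < k.toNat →
          pvOk board player n (r + t * (pvDirI i).1) (c + t * (pvDirI i).2) = true) := by
  rw [pvEnds_getD _ _ _ h0 h4, pvV]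
  obtain ⟨dr, dc, he⟩ : ∃ dr dc, pvDirI i = (dr, dc) := ⟨(pvDirI i).1, (pvDirI i).2, rfl⟩
  have hmem := pvDirI_mem h0 h4
  rw [he] at hmem
  rw [he]
  simp only
  have hcast : k = ((k.toNat : Nat) : Int) := by omega
  rw [hcast]
  rw [pvEc_ge_iff hmem k.toNat (r + (((k.toNat : Nat) : Int) - 1) * dr) (c + (((k.toNat : Nat) : Int) - 1) * dc)]
  exact pvChain_rev k.toNat r c

-- A's per-direction walk from a player cell, characterized by the forward chain
theorem pvWalkA_dir {board player : _} {k n dr dc r c : Int} (hd : (dr, dc) ∈ pvDirs)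
    (hk2 : 2 ≤ k) (hr : 0 ≤ r) (hrn : r < n) (hc : 0 ≤ c) (hcn : c < n)
    (hok0 : pvOk board player n r c = true) :
    pvWalkA board player k n dr dc [(r, c)] (r + dr) (c + dc) (n.toNat + 1) =
      (if ∀ t : Nat, t < k.toNat → pvOk board player n (r + t * dr) (c + t * dc) = true
       then some ((List.range k.toNat).map (fun t : Nat => (r + (t : Int) * dr, c + (t : Int) * dc)))
       else none) := by
  have hfuel : (n - (if dr = 0 then c + dc else r + dr)).toNat + 1 ≤ n.toNat + 1 := by
    simp only [pvDirs, List.mem_cons, List.not_mem_nil, or_false, Prod.mk.injEq] at hd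
    rcases hd with ⟨e1, e2⟩ | ⟨e1, e2⟩ | ⟨e1, e2⟩ | ⟨e1, e2⟩ <;> subst e1 <;> subst e2 <;>
      first
        | (rw [if_pos rfl]; omega)
        | (rw [if_neg (by decide)]; omega)
  rw [pvWalkA_eq hd (n.toNat + 1) (k - 1).toNat [(r, c)] (r + dr) (c + dc) (by omega)
    (by simp only [List.length_cons, List.length_nil]; push_cast; omega) hfuel]
  have hshift : (∀ t : Nat, t < (k - 1).toNat →
      pvOk board player n (r + dr + t * dr) (c + dc + t * dc) = true)
      ↔ (∀ t : Nat, t < k.toNat → pvOk board player n (r + t * dr) (c + t * dc) = true) := by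
    constructor
    · intro h t ht
      cases t with
      | zero => simpa using hok0
      | succ t =>
        have := h t (by omega)
        have e1 : r + dr + t * dr = r + ((t + 1 : Nat) : Int) * dr := by push_cast; ring
        have e2 : c + dc + t * dc = c + ((t + 1 : Nat) : Int) * dc := by push_cast; ring
        rw [e1, e2] at this
        exact this
    · intro h t ht
      have := h (t + 1) (by omega)
      have e1 : r + ((t + 1 : Nat) : Int) * dr = r + dr + t * dr := by push_cast; ring
      have e2 : c + ((t + 1 : Nat) : Int) * dc = c + dc + t * dc := by push_cast; ring
      rw [e1, e2] at this
      exact this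
  have hlist : ([(r, c)] ++ (List.range (k - 1).toNat).map
        (fun t : Nat => (r + dr + (t : Int) * dr, c + dc + (t : Int) * dc)))
      = (List.range k.toNat).map (fun t : Nat => (r + (t : Int) * dr, c + (t : Int) * dc)) := by
    rw [show k.toNat = (k - 1).toNat + 1 from by omega, List.range_succ_eq_map, List.map_cons,
      List.map_map]
    simp only [Nat.cast_zero, zero_mul, add_zero, List.singleton_append]
    congr 1
    refine List.map_congr_left (fun t _ => ?_)
    simp only [Function.comp_apply, Prod.mk.injEq]
    constructor <;> (push_cast; ring)
  rw [hlist]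
  exact if_congr hshift rfl rfl

-- B's output segment equals A's
theorem pvSegEq {k r c dr dc : Int} (hk : 1 ≤ k) :
    (PySem.List.pyRange 0 k 1).map (fun t => (r + t * dr, c + t * dc))
      = (List.range k.toNat).map (fun t : Nat => (r + (t : Int) * dr, c + (t : Int) * dc)) := by
  have hcast : k = ((k.toNat : Nat) : Int) := by omega
  rw [show PySem.List.pyRange 0 k 1 = PySem.List.pyRange 0 ((k.toNat : Nat) : Int) from by rw [← hcast]]
  rw [PySem.List.pyRange_zero_natCast, List.map_map]
  rfl

-- one cell of the scan: A's guarded four-direction walk equals B's four dict tests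
theorem pvCellEq {board : List (List String)} {player : String} {k n r c : Int} (hk : 1 ≤ k)
    (hr : 0 ≤ r) (hrn : r < n) (hc : 0 ≤ c) (hcn : c < n)
    (hsp : 2 ≤ k ∨ (pvCell board r c == some player) = false) :
    (if pvCell board r c == some player
     then pvTryDirsA board player k n r c [(0, 1), (1, 0), (1, 1), (1, -1)]
     else none)
    = pvScanDirsB (pvEnds board player n) k r c (PySem.List.pyRange 0 4 1) := by
  have hC0 := pvHitB_iff (board := board) (player := player) (n := n) (k := k) 0 r c (by omega) (by omega) hk
  have hC1 := pvHitB_iff (board := board) (player := player) (n := n) (k := k) 1 r c (by omega) (by omega) hk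
  have hC2 := pvHitB_iff (board := board) (player := player) (n := n) (k := k) 2 r c (by omega) (by omega) hk
  have hC3 := pvHitB_iff (board := board) (player := player) (n := n) (k := k) 3 r c (by omega) (by omega) hk
  rw [show pvDirI 0 = ((0 : Int), (1 : Int)) from by decide] at hC0
  rw [show pvDirI 1 = ((1 : Int), (0 : Int)) from by decide] at hC1
  rw [show pvDirI 2 = ((1 : Int), (1 : Int)) from by decide] at hC2
  rw [show pvDirI 3 = ((1 : Int), (-1 : Int)) from by decide] at hC3
  simp only at hC0 hC1 hC2 hC3
  rw [show PySem.List.pyRange 0 4 1 = [0, 1, 2, 3] from by decide]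
  simp only [pvScanDirsB,
    show PySem.List.pyGetD pvDirs 0 (0, 0) = ((0 : Int), (1 : Int)) from by decide,
    show PySem.List.pyGetD pvDirs 1 (0, 0) = ((1 : Int), (0 : Int)) from by decide,
    show PySem.List.pyGetD pvDirs 2 (0, 0) = ((1 : Int), (1 : Int)) from by decide,
    show PySem.List.pyGetD pvDirs 3 (0, 0) = ((1 : Int), (-1 : Int)) from by decide]
  simp only [pvSegEq hk]
  cases hp : (pvCell board r c == some player) with
  | false =>
    simp only [Bool.false_eq_true, if_false]
    have hokc : pvOk board player n r c = false := by rw [pvOk, hp, Bool.and_false]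
    have hnF : ∀ dr dc : Int,
        ¬ ∀ t : Nat, t < k.toNat → pvOk board player n (r + t * dr) (c + t * dc) = true := by
      intro dr dc h
      have h0 := h 0 (by omega)
      simp only [Nat.cast_zero, zero_mul, add_zero] at h0
      rw [hokc] at h0
      cases h0
    rw [if_neg (fun h => hnF 0 1 (hC0.mp h)), if_neg (fun h => hnF 1 0 (hC1.mp h)),
      if_neg (fun h => hnF 1 1 (hC2.mp h)), if_neg (fun h => hnF 1 (-1) (hC3.mp h))]
  | true =>
    have hk2 : 2 ≤ k := by
      rcases hsp with h | h
      · exact h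
      · rw [hp] at h; cases h
    have hok0 : pvOk board player n r c = true := by
      rw [pvOk, pv_in_bounds, hp]
      simp only [Bool.and_true, Bool.and_eq_true, decide_eq_true_eq]
      exact ⟨⟨⟨hr, hrn⟩, hc⟩, hcn⟩
    simp only [if_true]
    simp only [pvTryDirsA]
    rw [pvWalkA_dir (show ((0 : Int), (1 : Int)) ∈ pvDirs from by decide) hk2 hr hrn hc hcn hok0,
      pvWalkA_dir (show ((1 : Int), (0 : Int)) ∈ pvDirs from by decide) hk2 hr hrn hc hcn hok0,
      pvWalkA_dir (show ((1 : Int), (1 : Int)) ∈ pvDirs from by decide) hk2 hr hrn hc hcn hok0,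
      pvWalkA_dir (show ((1 : Int), (-1 : Int)) ∈ pvDirs from by decide) hk2 hr hrn hc hcn hok0]
    by_cases hF0 : ∀ t : Nat, t < k.toNat → pvOk board player n (r + t * 0) (c + t * 1) = true
    · rw [if_pos hF0, if_pos (hC0.mpr hF0)]
    · rw [if_neg hF0, if_neg (fun h => hF0 (hC0.mp h))]
      by_cases hF1 : ∀ t : Nat, t < k.toNat → pvOk board player n (r + t * 1) (c + t * 0) = true
      · rw [if_pos hF1, if_pos (hC1.mpr hF1)]
      · rw [if_neg hF1, if_neg (fun h => hF1 (hC1.mp h))]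
        by_cases hF2 : ∀ t : Nat, t < k.toNat → pvOk board player n (r + t * 1) (c + t * 1) = true
        · rw [if_pos hF2, if_pos (hC2.mpr hF2)]
        · rw [if_neg hF2, if_neg (fun h => hF2 (hC2.mp h))]
          by_cases hF3 : ∀ t : Nat, t < k.toNat → pvOk board player n (r + t * 1) (c + t * (-1)) = true
          · rw [if_pos hF3, if_pos (hC3.mpr hF3)]
          · rw [if_neg hF3, if_neg (fun h => hF3 (hC3.mp h))]

theorem pvScanColsEq {board : List (List String)} {player : String} {k n r : Int} (hk : 1 ≤ k)
    (hr : 0 ≤ r) (hrn : r < n)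
    (hsp : 2 ≤ k ∨ ∀ x y : Int, 0 ≤ x → x < n → 0 ≤ y → y < n →
      (pvCell board x y == some player) = false) :
    ∀ cs : List Int, (∀ c ∈ cs, 0 ≤ c ∧ c < n) →
      pvScanColsA board player k n r cs = pvScanColsB (pvEnds board player n) k r cs := by
  intro cs
  induction cs with
  | nil => intro _; rfl
  | cons c cs ih =>
    intro hmem
    obtain ⟨hc, hcn⟩ := hmem c (List.mem_cons_self ..)
    have hcell := pvCellEq (board := board) (player := player) hk hr hrn hc hcn
      (hsp.imp id (fun h => h r c hr hrn hc hcn))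
    simp only [pvScanColsA, pvScanColsB]
    cases hp : (pvCell board r c == some player) with
    | false =>
      simp only [hp, Bool.false_eq_true, if_false] at hcell ⊢
      rw [← hcell]
      exact ih (fun c' hc' => hmem c' (List.mem_cons_of_mem _ hc'))
    | true =>
      simp only [hp, if_true] at hcell ⊢
      rw [← hcell]
      cases ht : pvTryDirsA board player k n r c [(0, 1), (1, 0), (1, 1), (1, -1)] with
      | some w => rfl
      | none => exact ih (fun c' hc' => hmem c' (List.mem_cons_of_mem _ hc'))

theorem pvScanRowsEq {board : List (List String)} {player : String} {k n : Int} (hk : 1 ≤ k)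
    (hsp : 2 ≤ k ∨ ∀ x y : Int, 0 ≤ x → x < n → 0 ≤ y → y < n →
      (pvCell board x y == some player) = false) :
    ∀ rs : List Int, (∀ r ∈ rs, 0 ≤ r ∧ r < n) →
      pvScanRowsA board player k n rs = pvScanRowsB (pvEnds board player n) k n rs := by
  intro rs
  induction rs with
  | nil => intro _; rfl
  | cons r rs ih =>
    intro hmem
    obtain ⟨hr, hrn⟩ := hmem r (List.mem_cons_self ..)
    have hcols := pvScanColsEq (board := board) (player := player) hk hr hrn hsp
      (PySem.List.pyRange 0 n 1)
      (fun c hc => by rw [PySem.List.mem_pyRange_one] at hc; exact ⟨hc.1, hc.2⟩)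
    simp only [pvScanRowsA, pvScanRowsB]
    rw [← hcols]
    cases ht : pvScanColsA board player k n r (PySem.List.pyRange 0 n 1) with
    | some w => rfl
    | none => exact ih (fun r' hr' => hmem r' (List.mem_cons_of_mem _ hr'))

-- a player cell seen through Python indexing is the cell D_ reads via getD
theorem pvCell_lookup {board : List (List String)} {x y : Int}
    (hrows : ∀ row ∈ board, (board.length : Int) ≤ (row.length : Int))
    (hx : 0 ≤ x) (hxn : x < (board.length : Int)) (hy : 0 ≤ y) (hyn : y < (board.length : Int)) :
    pvCell board x y = some ((board.getD x.toNat []).getD y.toNat "") := by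
  have hxlt : x.toNat < board.length := by omega
  obtain ⟨row, hrow⟩ : ∃ row, board[x.toNat]? = some row :=
    ⟨board[x.toNat], List.getElem?_eq_getElem hxlt⟩
  have hrmem : row ∈ board := by
    have hm : board[x.toNat] ∈ board := List.getElem_mem hxlt
    have hrow' := hrow
    rw [List.getElem?_eq_getElem hxlt, Option.some.injEq] at hrow'
    exact hrow' ▸ hm
  have hylt : y.toNat < row.length := by
    have := hrows row hrmem
    omega
  rw [pvCell, show x = ((x.toNat : Nat) : Int) from by omega,
    show y = ((y.toNat : Nat) : Int) from by omega,
    PySem.List.pyGet?_natCast, hrow]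
  simp only [Option.bind_some, PySem.List.pyGet?_natCast]
  rw [List.getElem?_eq_getElem hylt]
  congr 1
  simp only [List.getD_eq_getElem?_getD, Int.toNat_natCast, hrow, Option.getD_some]
  rw [List.getElem?_eq_getElem hylt]
  rfl

-- A's while-loop can never report once the accumulator has already reached k cells
theorem pvWalkA_none_of_le {board player : _} {k n dr dc : Int} :
    ∀ (f : Nat) (acc : List (Int × Int)) (rr cc : Int), k ≤ (acc.length : Int) →
      pvWalkA board player k n dr dc acc rr cc f = none := by
  intro f
  induction f with
  | zero => intro acc rr cc _; rfl
  | succ f ih =>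
    intro acc rr cc hlen
    simp only [pvWalkA]
    split
    · rw [if_neg (by
        simp only [List.length_append, List.length_cons, List.length_nil]
        push_cast; omega)]
      exact ih _ _ _ (by
        simp only [List.length_append, List.length_cons, List.length_nil]
        push_cast; omega)
    · rfl

theorem pvTryDirsA_none_k1 {board player : _} {k n r c : Int} (hk : k ≤ 1) :
    ∀ ds : List (Int × Int), pvTryDirsA board player k n r c ds = none := by
  intro ds
  induction ds with
  | nil => rfl
  | cons d ds ih =>
    obtain ⟨dr, dc⟩ := d
    simp only [pvTryDirsA]
    rw [pvWalkA_none_of_le _ _ _ _ (by simp only [List.length_cons, List.length_nil]; omega)]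
    exact ih

theorem pvScanColsA_none_k1 {board player : _} {k n r : Int} (hk : k ≤ 1) :
    ∀ cs : List Int, pvScanColsA board player k n r cs = none := by
  intro cs
  induction cs with
  | nil => rfl
  | cons c cs ih =>
    simp only [pvScanColsA]
    rw [pvTryDirsA_none_k1 hk]
    split <;> exact ih

theorem pvScanRowsA_none_k1 {board player : _} {k n : Int} (hk : k ≤ 1) :
    ∀ rs : List Int, pvScanRowsA board player k n rs = none := by
  intro rs
  induction rs with
  | nil => rfl
  | cons r rs ih =>
    simp only [pvScanRowsA]
    rw [pvScanColsA_none_k1 hk]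
    exact ih

theorem pvScanDirsB_none {ends : PySem.Dict (Int × Int × Int) Int} {k r c : Int} :
    ∀ is : List Int, pvScanDirsB ends k r c is = none → ∀ i ∈ is,
      ¬ (k ≤ ends.getD (i, r + (k - 1) * (PySem.List.pyGetD pvDirs i (0, 0)).1,
          c + (k - 1) * (PySem.List.pyGetD pvDirs i (0, 0)).2) 0) := by
  intro is
  induction is with
  | nil => intro _ i hi; cases hi
  | cons j is ih =>
    intro h i hi
    simp only [pvScanDirsB] at h
    by_cases hc : k ≤ ends.getD (j, r + (k - 1) * (PySem.List.pyGetD pvDirs j (0, 0)).1,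
        c + (k - 1) * (PySem.List.pyGetD pvDirs j (0, 0)).2) 0
    · rw [if_pos hc] at h
      cases h
    · rw [if_neg hc] at h
      rcases List.mem_cons.mp hi with he | hm
      · subst he; exact hc
      · exact ih h i hm

theorem pvScanColsB_none {ends : PySem.Dict (Int × Int × Int) Int} {k r : Int} :
    ∀ cs : List Int, pvScanColsB ends k r cs = none → ∀ c ∈ cs,
      pvScanDirsB ends k r c (PySem.List.pyRange 0 4 1) = none := by
  intro cs
  induction cs with
  | nil => intro _ c hc; cases hc
  | cons c' cs ih =>
    intro h c hc
    simp only [pvScanColsB] at h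
    cases hd : pvScanDirsB ends k r c' (PySem.List.pyRange 0 4 1) with
    | some w => rw [hd] at h; cases h
    | none =>
      rw [hd] at h
      rcases List.mem_cons.mp hc with he | hm
      · subst he; exact hd
      · exact ih h c hm

theorem pvScanRowsB_none {ends : PySem.Dict (Int × Int × Int) Int} {k n : Int} :
    ∀ rs : List Int, pvScanRowsB ends k n rs = none → ∀ r ∈ rs,
      pvScanColsB ends k r (PySem.List.pyRange 0 n 1) = none := by
  intro rs
  induction rs with
  | nil => intro _ r hr; cases hr
  | cons r' rs ih =>
    intro h r hr
    simp only [pvScanRowsB] at h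
    cases hd : pvScanColsB ends k r' (PySem.List.pyRange 0 n 1) with
    | some w => rw [hd] at h; cases h
    | none =>
      rw [hd] at h
      rcases List.mem_cons.mp hr with he | hm
      · subst he; exact hd
      · exact ih h r hm

-- ===== VERDICT =====
theorem find_winning_cells_spec : Claim_unchanged_find_winning_cells := by
  intro board player k _ hPre hnD
  have hrows' : ∀ row ∈ board, (board.length : Int) ≤ (row.length : Int) := by
    intro row hrow
    have := hPre row hrow
    omega
  show pvScanRowsA board player k (board.length : Int) (PySem.List.pyRange 0 (board.length : Int) 1)
      = if k < 1 then none
        else pvScanRowsB (pvEnds board player (board.length : Int)) k (board.length : Int)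
          (PySem.List.pyRange 0 (board.length : Int) 1)
  by_cases hklt : k < 1
  · rw [if_pos hklt, pvScanRowsA_none_k1 (by omega) _]
  rw [if_neg hklt]
  have hmem : ∀ r ∈ PySem.List.pyRange 0 (board.length : Int) 1,
      0 ≤ r ∧ r < (board.length : Int) := by
    intro r hr
    rw [PySem.List.mem_pyRange_one] at hr
    exact ⟨hr.1, hr.2⟩
  by_cases hk2 : 2 ≤ k
  · exact pvScanRowsEq (by omega) (Or.inl hk2) _ hmem
  · have hk1 : k = 1 := by omega
    have hany : ((List.range board.length).any fun r => (List.range board.length).any fun c =>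
        (board.getD r []).getD c "" == player) = false := by
      cases hb : ((List.range board.length).any fun r => (List.range board.length).any fun c =>
          (board.getD r []).getD c "" == player) with
      | false => rfl
      | true => exact absurd (show D_find_winning_cells board player k from ⟨hk1, hb⟩) hnD
    have hnop : ∀ x y : Int, 0 ≤ x → x < (board.length : Int) → 0 ≤ y → y < (board.length : Int) →
        (pvCell board x y == some player) = false := by
      intro x y hx hxn hy hyn
      rw [pvCell_lookup hrows' hx hxn hy hyn]
      rw [List.any_eq_false] at hany
      have h2 := hany _ (List.mem_range.mpr (show x.toNat < board.length by omega))
      rw [Bool.not_eq_true, List.any_eq_false] at h2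
      have h3 := h2 _ (List.mem_range.mpr (show y.toNat < board.length by omega))
      rw [Bool.not_eq_true] at h3
      rw [beq_eq_false_iff_ne] at h3 ⊢
      intro hcon
      exact h3 (Option.some.inj hcon)
    exact pvScanRowsEq (by omega) (Or.inr hnop) _ hmem
theorem find_winning_cells_changed : Claim_changed_find_winning_cells := by
  unfold Claim_changed_find_winning_cells; decide
theorem find_winning_cells_tight : Claim_exact_find_winning_cells := by
  intro board player k _ hPre hD
  have hrows' : ∀ row ∈ board, (board.length : Int) ≤ (row.length : Int) := by
    intro row hrow
    have := hPre row hrow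
    omega
  obtain ⟨hk1, hany⟩ := hD
  subst hk1
  have hA : find_winning_cells board player 1 = none :=
    pvScanRowsA_none_k1 (le_refl 1) _
  rw [hA]
  show none ≠ if (1 : Int) < 1 then none
    else pvScanRowsB (pvEnds board player (board.length : Int)) 1 (board.length : Int)
      (PySem.List.pyRange 0 (board.length : Int) 1)
  rw [if_neg (by omega)]
  intro heq
  -- extract a player cell from D_
  rw [List.any_eq_true] at hany
  obtain ⟨rn, hrn, hinner⟩ := hany
  rw [List.any_eq_true] at hinner
  obtain ⟨cn, hcn, hcell⟩ := hinner
  rw [List.mem_range] at hrn hcn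
  have hx : (0 : Int) ≤ (rn : Int) := by omega
  have hxn : ((rn : Int)) < (board.length : Int) := by omega
  have hy : (0 : Int) ≤ (cn : Int) := by omega
  have hyn : ((cn : Int)) < (board.length : Int) := by omega
  have hlook := pvCell_lookup (x := (rn : Int)) (y := (cn : Int)) hrows' hx hxn hy hyn
  simp only [Int.toNat_natCast] at hlook
  have hok : pvOk board player (board.length : Int) (rn : Int) (cn : Int) = true := by
    rw [pvOk, pv_in_bounds, hlook]
    simp only [Bool.and_eq_true, decide_eq_true_eq, beq_iff_eq, Option.some.injEq]
    rw [beq_iff_eq] at hcell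
    exact ⟨⟨⟨⟨hx, hxn⟩, hy⟩, hyn⟩, hcell⟩
  -- B returned none: propagate down to direction 0 at (rn, cn)
  have halt : pvScanRowsB (pvEnds board player (board.length : Int)) 1 (board.length : Int)
      (PySem.List.pyRange 0 (board.length : Int) 1) = none := heq.symm
  have hcols := pvScanRowsB_none _ halt (rn : Int)
    (by rw [PySem.List.mem_pyRange_one]; omega)
  have hdirs := pvScanColsB_none _ hcols (cn : Int)
    (by rw [PySem.List.mem_pyRange_one]; omega)
  have hhit := pvScanDirsB_none _ hdirs 0 (by
    rw [show PySem.List.pyRange 0 4 1 = [0, 1, 2, 3] from by decide]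
    simp)
  rw [show PySem.List.pyGetD pvDirs 0 (0, 0) = ((0 : Int), (1 : Int)) from by decide] at hhit
  simp only [show (1 : Int) - 1 = 0 from rfl, zero_mul, add_zero] at hhit
  rw [pvEnds_getD _ _ _ (by omega) (by omega)] at hhit
  apply hhit
  rw [pvV, show pvDirI 0 = ((0 : Int), (1 : Int)) from by decide]
  simp only
  rw [pvEc_unfold (show ((0 : Int), (1 : Int)) ∈ pvDirs from by decide), if_pos hok]
  have hnn : 0 ≤ pvEc board player (board.length : Int) 0 1 ((rn : Int) - 0) ((cn : Int) - 1) :=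
    pvE_nonneg board player (board.length : Int) 0 1 _ _ _
  omega
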